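-- pv_equiv track=rewrite | github.com/ConstantinLenoir/texas | play.py | find_max_sequence
-- ===== SOURCE A (Python) =====
-- from collections import Counter, defaultdict, namedtuple
--
-- def card_value(c):
--     # A special case for the aces.
--     return 13 if c % 13 == 0 else c % 13
--
-- def find_max_sequence(cards):
--     """
--     Test the presence of a straights.
--     The role of the ace card (0) is complex regarding sequences.
--     The output sequence is ordered.
--     Only the first encountered longest sequence is selected. It's not a problem
--     in the case of Texas hands.
--     Only the top 5 elements of the longest sequence are returned.
--     Two sequences are returned:
--     one with the card values (0-13), the other with the card identifiers (0-52)
--     For less than 14 cards, there is no risk of including both 0 and 13 in the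
--     returned sequence.
--     Interesting use case of a dictionary.
--     """
--     Cards = namedtuple("Card", ["value", "id"])
--     card_dict = {card_value(c): Cards(value=card_value(c), id=c) for c in cards}
--     if len(card_dict) == 1:
--         return []
--     # The ace card plays two roles.
--     if 13 in card_dict:
--         # NOTE deque is faster for prepending.
--         card_dict[0] = Cards(value=0, id=card_dict[13].id)
--     cards = sorted(card_dict.values())
--     sequence = [cards[0]]
--     sequences = []
--     for i in range(len(cards) - 1):
--         if cards[i + 1].value == cards[i].value + 1:
--             sequence.append(cards[i + 1])
--         else:
--             sequences.append(sequence)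
--             sequence = [cards[i + 1]]
--     # The following instruction is easy to forget.
--     sequences.append(sequence)
--     max_sequence = sorted(sequences, key=len)[-1]
--     # A Texas hand has only 5 cards.
--     max_sequence = max_sequence[-5:]
--     return list(zip(*max_sequence))
-- ===== SOURCE B (Python) =====
-- def find_max_sequence(cards):
--     # Same preprocessing as the original; then find the longest consecutive run
--     # with a set-based run-start scan instead of sort-split-and-stable-sort.
--     def card_value(c):
--         return 13 if c % 13 == 0 else c % 13
--     card_dict = {card_value(c): (card_value(c), c) for c in cards}
--     if len(card_dict) == 1:
--         return []
--     if 13 in card_dict: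
--         card_dict[0] = (0, card_dict[13][1])
--     vals = set(card_dict)
--     best = []
--     for v in sorted(vals):
--         if v - 1 in vals:
--             continue
--         run = []
--         w = v
--         while w in vals:
--             run.append(card_dict[w])
--             w += 1
--         if len(run) >= len(best):
--             best = run
--     best = best[-5:]
--     return list(zip(*best))
-- ===== Notes on version B (the rewrite author's own statement) =====
-- stated objective: faster
-- what changed: After the same value->card dict preprocessing, B finds the longest straight by a set-based longest-consecutive-run scan (walk forward from each value whose predecessor is absent, keep the last longest) instead of A's sort-the-card-tuples, split-into-runs-by-an-index-loop, then stable-sort-the-runs-by-length-and-take-the-last; B sorts only plain ints once, measured ~2.8x faster.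
import Mathlib
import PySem

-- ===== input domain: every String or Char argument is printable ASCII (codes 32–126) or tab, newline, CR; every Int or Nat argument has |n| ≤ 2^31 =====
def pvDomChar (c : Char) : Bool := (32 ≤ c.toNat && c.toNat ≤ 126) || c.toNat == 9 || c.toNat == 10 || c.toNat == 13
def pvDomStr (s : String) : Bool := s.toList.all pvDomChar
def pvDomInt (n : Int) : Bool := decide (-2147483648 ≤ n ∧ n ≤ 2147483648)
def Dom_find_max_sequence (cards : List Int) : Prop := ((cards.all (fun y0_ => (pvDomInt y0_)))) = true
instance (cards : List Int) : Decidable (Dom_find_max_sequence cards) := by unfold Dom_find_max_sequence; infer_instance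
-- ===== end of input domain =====

-- B replaces A's sort/split/stable-sort-by-length pipeline by a set-based longest-consecutive-run
-- scan over the same value->card dict (measured faster in a timing run); equal output on
-- every nonempty input (A raises IndexError on []).


-- ===== PORT A =====
-- helper card_value
def card_value (c : Int) : Int :=
  if PySem.Int.mod c 13 = 0 then 13 else PySem.Int.mod c 13

-- {card_value(c): (card_value(c), c) for c in cards}
def cardDict (cards : List Int) : PySem.Dict Int (Int × Int) :=
  cards.foldl (fun d c => d.insert (card_value c) (card_value c, c)) PySem.Dict.empty

-- if 13 in card_dict: card_dict[0] = (0, card_dict[13].id)  (the lookup card_dict[13]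
-- is guarded by the contains test, so getD is exact here)
def withAce (d : PySem.Dict Int (Int × Int)) : PySem.Dict Int (Int × Int) :=
  if d.contains 13 then d.insert 0 (0, (d.getD 13 (0, 0)).2) else d

def find_max_sequence (cards : List Int) : List (List Int) :=
  let d := cardDict cards
  if d.size = 1 then []
  else
    let d2 := withAce d
    -- sorted(card_dict.values()): Python tuple comparison = sorted2 on (fst, snd)
    let cs := PySem.List.sorted2 d2.values Prod.fst Prod.snd
    -- for i in range(len(cards)-1): … — the index loop reads cards[i], cards[i+1]; exact as a
    -- fold over adjacent pairs.  cards[0] raises IndexError on [] (outside Pre_); headD is exact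
    -- whenever cs ≠ [].
    let st := (cs.zip cs.tail).foldl
      (fun (st : List (Int × Int) × List (List (Int × Int))) pq =>
        if pq.2.1 = pq.1.1 + 1 then (st.1 ++ [pq.2], st.2)
        else ([pq.2], st.2 ++ [st.1]))
      ([cs.headD (0, 0)], [])
    let sequences := st.2 ++ [st.1]
    let maxSeq := PySem.List.pyGetD (PySem.List.sorted sequences (fun s => s.length) false) (-1) []
    let maxSeq5 := PySem.List.slice maxSeq (some (-5)) none
    -- list(zip(*max_sequence)) on a list of pairs: [] if empty, else [firsts, seconds] (exact)
    match maxSeq5 with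
    | [] => []
    | _ => [maxSeq5.map Prod.fst, maxSeq5.map Prod.snd]

-- ===== PORT B =====
-- while w in vals: run.append(card_dict[w]); w += 1 — fuel-guarded recursion; fuel = |vals| is
-- enough: the walk visits distinct consecutive members of vals, so it stops within |vals| steps
-- (with exactly |vals| appends the next value cannot be in vals either), hence exact.
def walkRun (d : PySem.Dict Int (Int × Int)) (vals : PySem.Set Int) : Nat → Int → List (Int × Int)
  | 0, _ => []
  | fuel + 1, w =>
    if PySem.Set.contains vals w then d.getD w (0, 0) :: walkRun d vals fuel (w + 1) else []

def find_max_sequence_alt (cards : List Int) : List (List Int) :=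
  let d := cardDict cards
  if d.size = 1 then []
  else
    let d2 := withAce d
    let vals : PySem.Set Int := PySem.Set.ofList d2.keys
    let best := (PySem.List.sorted vals (fun v => v) false).foldl
      (fun best v =>
        if vals.contains (v - 1) then best
        else
          let run := walkRun d2 vals vals.length v
          if best.length ≤ run.length then run else best)
      ([] : List (Int × Int))
    let best5 := PySem.List.slice best (some (-5)) none
    -- list(zip(*best)) on a list of pairs: [] if empty, else [firsts, seconds] (exact)
    if best5 = [] then [] else [best5.map Prod.fst, best5.map Prod.snd]

-- ===== PRECONDITION & SPEC =====
-- Pre_ excludes only the empty list, on which A raises IndexError (cards[0] of the empty list).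
def Pre_find_max_sequence (cards : List Int) : Prop := cards ≠ []
instance (cards : List Int) : Decidable (Pre_find_max_sequence cards) := by unfold Pre_find_max_sequence; infer_instance
def pvWitness_find_max_sequence : List Int := [1, 2, 3]

def Spec_find_max_sequence (cards : List Int) (out : List (List Int)) : Prop := out = find_max_sequence_alt cards
instance (cards : List Int) (out : List (List Int)) : Decidable (Spec_find_max_sequence cards out) := by unfold Spec_find_max_sequence; infer_instance

-- ===== CLAIM (what is proved, stated in full; the proofs are below) =====
def Claim_equal_find_max_sequence : Prop := ∀ (cards : List Int), Dom_find_max_sequence cards → Pre_find_max_sequence cards → Spec_find_max_sequence cards (find_max_sequence cards)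

-- ===== LEMMAS AND PROOFS =====

-- g-level notation: g k = the card stored for value k
def cardOf (d : PySem.Dict Int (Int × Int)) (k : Int) : Int × Int := d.getD k (0, 0)

-- key-level walk (proof-side mirror of walkRun)
def walkKeys (vals : List Int) : Nat → Int → List Int
  | 0, _ => []
  | fuel + 1, w => if PySem.Set.contains vals w then w :: walkKeys vals fuel (w + 1) else []

-- key-level mirror of A's splitting loop
def splitA : Int → List Int → List Int → List (List Int) → (List Int × List (List Int))
  | _, [], s, ss => (s, ss)
  | x, y :: ys, s, ss =>
    if y = x + 1 then splitA y ys (s ++ [y]) ss else splitA y ys [y] (ss ++ [s])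

-- maximal consecutive run decomposition
def takeRun (p : Int) : List Int → List Int
  | [] => []
  | y :: ys => if y = p + 1 then y :: takeRun y ys else []

def dropRun (p : Int) : List Int → List Int
  | [] => []
  | y :: ys => if y = p + 1 then dropRun y ys else y :: ys

lemma dropRun_length_le (p : Int) (l : List Int) : (dropRun p l).length ≤ l.length := by
  induction l generalizing p with
  | nil => simp [dropRun]
  | cons y ys ih =>
    simp only [dropRun]
    split
    · exact (ih y).trans (by simp)
    · simp

def runs : List Int → List (List Int)
  | [] => []
  | x :: xs => (x :: takeRun x xs) :: runs (dropRun x xs)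
  termination_by l => l.length
  decreasing_by
    simpa using Nat.lt_succ_of_le (dropRun_length_le x xs)

-- the last-longest pick
def pick (b r : List Int) : List Int := if b.length ≤ r.length then r else b

-- key-level mirror of B's best-run fold
def bFoldK (M : List Int) (fuel : Nat) (K : List Int) : List Int :=
  K.foldl (fun best v => if PySem.Set.contains M (v - 1) then best else pick best (walkKeys M fuel v)) []

-- ---------- generic insertBy facts ----------

lemma insertBy_ne_nil {α : Type} (lt : α → α → Bool) (x : α) (acc : List α) :
    PySem.List.insertBy lt x acc ≠ [] := by
  cases acc with
  | nil => simp [PySem.List.insertBy]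
  | cons a as => simp only [PySem.List.insertBy]; split <;> simp

lemma insertBy_congr {α : Type} (lt lt' : α → α → Bool) (x : α) (acc : List α)
    (h : ∀ b ∈ acc, lt x b = lt' x b) :
    PySem.List.insertBy lt x acc = PySem.List.insertBy lt' x acc := by
  induction acc with
  | nil => rfl
  | cons a as ih =>
    simp only [PySem.List.insertBy]
    rw [h a (by simp)]
    split
    · rfl
    · rw [ih (fun b hb => h b (by simp [hb]))]

lemma foldl_insertBy_congr {α : Type} (lt lt' : α → α → Bool) (S : List α)
    (h : ∀ a ∈ S, ∀ b ∈ S, lt a b = lt' a b) :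
    ∀ (xs acc : List α), (∀ a ∈ xs, a ∈ S) → (∀ b ∈ acc, b ∈ S) →
      xs.foldl (fun acc x => PySem.List.insertBy lt x acc) acc
        = xs.foldl (fun acc x => PySem.List.insertBy lt' x acc) acc := by
  intro xs
  induction xs with
  | nil => intro acc _ _; rfl
  | cons x xs ih =>
    intro acc hxs hacc
    simp only [List.foldl_cons]
    rw [insertBy_congr lt lt' x acc (fun b hb => h x (hxs x (by simp)) b (hacc b hb))]
    exact ih _ (fun a ha => hxs a (by simp [ha]))
      (fun b hb => ((PySem.List.mem_insertBy _ _ _ _).1 hb).elim (fun e => e ▸ hxs x (by simp)) (hacc b))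

lemma getLast?_insertBy_of_exists {α : Type} (lt : α → α → Bool) (x : α) :
    ∀ (acc : List α) (y : α), y ∈ acc → lt x y = true →
      (PySem.List.insertBy lt x acc).getLast? = acc.getLast? := by
  intro acc
  induction acc with
  | nil => intro y hy; simp at hy
  | cons a as ih =>
    intro y hy hlt
    simp only [PySem.List.insertBy]
    split
    · rw [List.getLast?_cons_cons]
    · rename_i hfa
      rcases List.mem_cons.1 hy with rfl | hy'
      · rw [hlt] at hfa; simp at hfa
      · cases as with
        | nil => simp at hy'
        | cons c cs =>
          have h2 := ih y hy' hlt
          cases has : PySem.List.insertBy lt x (c :: cs) with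
          | nil => exact absurd has (insertBy_ne_nil lt x _)
          | cons b bs =>
            rw [has] at h2
            rw [List.getLast?_cons_cons, List.getLast?_cons_cons, h2]

lemma getLast?_foldl_insertBy {α : Type} (key : α → Nat) :
    ∀ (rs acc : List α) (b : α), acc.getLast? = some b → (∀ y ∈ acc, key y ≤ key b) →
      ((rs.foldl (fun acc x => PySem.List.insertBy (fun a c => decide (key a < key c)) x acc) acc).getLast?
        = some (rs.foldl (fun bb r => if key bb ≤ key r then r else bb) b)) := by
  intro rs
  induction rs with
  | nil => intro acc b hb _; exact hb
  | cons x xs ih =>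
    intro acc b hb hmax
    simp only [List.foldl_cons]
    by_cases hbx : key b ≤ key x
    · have happ : PySem.List.insertBy (fun a c => decide (key a < key c)) x acc = acc ++ [x] := by
        apply PySem.List.insertBy_of_forall_not_before
        intro y hy
        have hyx : ¬ (key x < key y) := not_lt.2 (le_trans (hmax y hy) hbx)
        simpa using hyx
      rw [happ, if_pos hbx]
      apply ih
      · simp
      · intro y hy
        rcases List.mem_append.1 hy with hy' | hy'
        · exact le_trans (hmax y hy') hbx
        · simp at hy'; simp [hy']
    · have hxb : key x < key b := lt_of_not_ge hbx
      have hbmem : b ∈ acc := List.mem_of_getLast? hb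
      have hrw := getLast?_insertBy_of_exists (fun a c => decide (key a < key c)) x acc b hbmem
        (decide_eq_true hxb)
      rw [if_neg hbx]
      apply ih _ b (by rw [hrw]; exact hb)
      intro y hy
      rcases (PySem.List.mem_insertBy _ _ _ _).1 hy with rfl | hy'
      · exact le_of_lt hxb
      · exact hmax y hy'

lemma lastLongest_eq_foldl {α : Type} (key : α → Nat) (r : α) (rest : List α) (dflt : α) :
    PySem.List.pyGetD (PySem.List.sorted (r :: rest) key false) (-1) dflt
      = rest.foldl (fun b x => if key b ≤ key x then x else b) r := by
  have h := getLast?_foldl_insertBy key rest [r] r (by simp) (by simp)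
  rw [PySem.List.sorted_eq_foldl_insertBy, List.foldl_cons]
  have hins : PySem.List.insertBy (fun a c => decide (key a < key c)) r ([] : List α) = [r] := rfl
  rw [hins]
  have hne : (rest.foldl (fun acc x => PySem.List.insertBy (fun a c => decide (key a < key c)) x acc) [r]) ≠ [] := by
    intro hnil
    rw [hnil] at h; simp at h
  rw [PySem.List.pyGetD_neg_one _ _ hne]
  rw [List.getLast?_eq_some_getLast hne] at h
  exact Option.some.inj h

-- ---------- dict invariants ----------

lemma cardDict_items_fst (cards : List Int) : ∀ p ∈ (cardDict cards).items, p.2.1 = p.1 := by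
  have aux : ∀ (l : List Int) (d : PySem.Dict Int (Int × Int)), (∀ p ∈ d.items, p.2.1 = p.1) →
      ∀ p ∈ (l.foldl (fun d c => d.insert (card_value c) (card_value c, c)) d).items, p.2.1 = p.1 := by
    intro l
    induction l with
    | nil => intro d hd; simpa using hd
    | cons c cs ih =>
      intro d hd
      simp only [List.foldl_cons]
      apply ih
      intro p hp
      rcases (PySem.Dict.mem_items_insert _ _ _ _).1 hp with rfl | ⟨hp', _⟩
      · rfl
      · exact hd p hp'
  exact aux cards PySem.Dict.empty (by simp [PySem.Dict.empty])

lemma withAce_items_fst (d : PySem.Dict Int (Int × Int)) (h : ∀ p ∈ d.items, p.2.1 = p.1) :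
    ∀ p ∈ (withAce d).items, p.2.1 = p.1 := by
  unfold withAce
  split
  · intro p hp
    rcases (PySem.Dict.mem_items_insert _ _ _ _).1 hp with rfl | ⟨hp', _⟩
    · rfl
    · exact h p hp'
  · exact h

lemma cardDict_nodup_keys (cards : List Int) : (cardDict cards).keys.Nodup := by
  exact PySem.Dict.nodup_keys_foldl_insert_key cards card_value
    (fun _ c => (card_value c, c)) PySem.Dict.empty PySem.Dict.nodup_keys_empty

lemma withAce_nodup_keys (d : PySem.Dict Int (Int × Int)) (h : d.keys.Nodup) :
    (withAce d).keys.Nodup := by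
  unfold withAce
  split
  · exact PySem.Dict.nodup_keys_insert _ _ _ h
  · exact h

lemma map_cardOf_keys (d : PySem.Dict Int (Int × Int)) (hnd : d.keys.Nodup) :
    d.keys.map (cardOf d) = d.values := by
  simp only [PySem.Dict.keys, PySem.Dict.values, List.map_map]
  apply List.map_congr_left
  intro p hp
  simp only [Function.comp_apply]
  exact PySem.Dict.getD_of_mem_items d (by exact hp) hnd (0, 0)

lemma cardOf_fst (d : PySem.Dict Int (Int × Int)) (hnd : d.keys.Nodup)
    (hinv : ∀ p ∈ d.items, p.2.1 = p.1) (k : Int) (hk : k ∈ d.keys) : (cardOf d k).1 = k := by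
  simp only [PySem.Dict.keys] at hk
  rcases List.mem_map.1 hk with ⟨p, hp, rfl⟩
  have : cardOf d p.1 = p.2 := PySem.Dict.getD_of_mem_items d (by exact hp) hnd (0, 0)
  rw [this]
  exact hinv p hp

lemma values_fst_inj (d : PySem.Dict Int (Int × Int)) (hnd : d.keys.Nodup)
    (hinv : ∀ p ∈ d.items, p.2.1 = p.1) :
    ∀ a ∈ d.values, ∀ b ∈ d.values, a.1 = b.1 → a = b := by
  intro a ha b hb hab
  simp only [PySem.Dict.values] at ha hb
  rcases List.mem_map.1 ha with ⟨p, hp, rfl⟩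
  rcases List.mem_map.1 hb with ⟨q, hq, rfl⟩
  have hfst : p.1 = q.1 := by rw [← hinv p hp, ← hinv q hq, hab]
  have : p = q := by
    simp only [PySem.Dict.keys] at hnd
    have := List.inj_on_of_nodup_map hnd hp hq hfst
    exact this
  rw [this]

-- ---------- the sorted card list is the sorted key list mapped through the dict ----------

lemma K_pairwise_lt (d : PySem.Dict Int (Int × Int)) (hnd : d.keys.Nodup) :
    (PySem.List.sorted d.keys (fun v => v) false).Pairwise (· < ·) := by
  have hle := PySem.List.sorted_pairwise d.keys (fun v => v)
  have hndK : (PySem.List.sorted d.keys (fun v => v) false).Nodup :=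
    (List.Perm.nodup_iff (PySem.List.sorted_perm d.keys (fun v => v) false)).2 hnd
  have := List.Pairwise.and hle hndK
  exact this.imp (fun h => lt_of_le_of_ne h.1 h.2)

lemma sorted_values_eq (d : PySem.Dict Int (Int × Int)) (hnd : d.keys.Nodup)
    (hinv : ∀ p ∈ d.items, p.2.1 = p.1) :
    PySem.List.sorted2 d.values Prod.fst Prod.snd
      = (PySem.List.sorted d.keys (fun v => v) false).map (cardOf d) := by
  have hinj := values_fst_inj d hnd hinv
  have h1 : PySem.List.sorted2 d.values Prod.fst Prod.snd
      = PySem.List.sorted d.values Prod.fst false := by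
    show d.values.foldl (fun acc x => PySem.List.insertBy _ x acc) []
      = PySem.List.sorted d.values Prod.fst false
    rw [PySem.List.sorted_eq_foldl_insertBy]
    apply foldl_insertBy_congr _ _ d.values _ d.values [] (fun a ha => ha) (by simp)
    intro a ha b hb
    rcases lt_trichotomy a.1 b.1 with h | h | h
    · simp [h, not_lt_of_gt h]
    · have : a = b := hinj a ha b hb h
      subst this
      simp
    · simp [h, not_lt_of_gt h]
  rw [h1]
  apply PySem.List.sorted_eq_of_perm_of_pairwise_lt
  · calc ((PySem.List.sorted d.keys (fun v => v) false).map (cardOf d)).Perm (d.keys.map (cardOf d)) :=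
        (PySem.List.sorted_perm d.keys (fun v => v) false).map (cardOf d)
      _ = d.values := map_cardOf_keys d hnd
  · have hK := K_pairwise_lt d hnd
    have hmem : ∀ k ∈ PySem.List.sorted d.keys (fun v => v) false, (cardOf d k).1 = k := by
      intro k hk
      exact cardOf_fst d hnd hinv k ((PySem.List.mem_sorted _ _ _ _).1 hk)
    rw [List.pairwise_map]
    exact (hK.imp_of_mem (fun {a b} ha hb hab => by rw [hmem a ha, hmem b hb]; exact hab))

-- ---------- A's index loop = splitA, mapped ----------

lemma zipfold_map (g : Int → Int × Int) :
    ∀ (xs : List Int) (x : Int) (s : List Int) (ss : List (List Int)),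
      (∀ a ∈ x :: xs, (g a).1 = a) →
      ((((x :: xs).map g).zip (xs.map g)).foldl
        (fun (st : List (Int × Int) × List (List (Int × Int))) pq =>
          if pq.2.1 = pq.1.1 + 1 then (st.1 ++ [pq.2], st.2)
          else ([pq.2], st.2 ++ [st.1]))
        (s.map g, ss.map (List.map g)))
      = ((splitA x xs s ss).1.map g, (splitA x xs s ss).2.map (List.map g)) := by
  intro xs
  induction xs with
  | nil => intro x s ss _; simp [splitA]
  | cons y ys ih =>
    intro x s ss hmem
    have hx : (g x).1 = x := hmem x (by simp)
    have hy : (g y).1 = y := hmem y (by simp)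
    simp only [List.map_cons, List.zip_cons_cons, List.foldl_cons]
    by_cases hcond : y = x + 1
    · rw [if_pos (by rw [hx, hy, hcond])]
      have := ih y (s ++ [y]) ss (fun a ha => hmem a (List.mem_cons_of_mem x ha))
      simp only [List.map_append, List.map_cons, List.map_nil] at this ⊢
      rw [splitA, if_pos hcond]
      exact this
    · rw [if_neg (by rw [hx, hy]; exact hcond)]
      have := ih y [y] (ss ++ [s]) (fun a ha => hmem a (List.mem_cons_of_mem x ha))
      simp only [List.map_append, List.map_cons, List.map_nil] at this ⊢
      rw [splitA, if_neg hcond]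
      exact this

lemma splitA_ss (xs : List Int) : ∀ (x : Int) (s : List Int) (ss : List (List Int)),
    (splitA x xs s ss).1 = (splitA x xs s []).1 ∧
    (splitA x xs s ss).2 = ss ++ (splitA x xs s []).2 := by
  induction xs with
  | nil => intro x s ss; simp [splitA]
  | cons y ys ih =>
    intro x s ss
    by_cases h : y = x + 1
    · simp only [splitA, if_pos h]
      exact ih y (s ++ [y]) ss
    · simp only [splitA, if_neg h]
      constructor
      · rw [(ih y [y] (ss ++ [s])).1, (ih y [y] ([] ++ [s])).1]
      · rw [(ih y [y] (ss ++ [s])).2, (ih y [y] ([] ++ [s])).2]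
        simp

lemma splitA_runs (xs : List Int) : ∀ (x : Int) (s₀ : List Int),
    (splitA x xs (s₀ ++ [x]) []).2 ++ [(splitA x xs (s₀ ++ [x]) []).1]
      = (s₀ ++ x :: takeRun x xs) :: runs (dropRun x xs) := by
  induction xs with
  | nil => intro x s₀; simp [splitA, takeRun, dropRun, runs]
  | cons y ys ih =>
    intro x s₀
    by_cases h : y = x + 1
    · simp only [splitA, if_pos h, takeRun, dropRun]
      have := ih y (s₀ ++ [x])
      simp only [List.append_assoc, List.cons_append, List.nil_append] at this ⊢
      rw [this]
    · simp only [splitA, if_neg h, takeRun, dropRun]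
      rw [(splitA_ss ys y [y] ([] ++ [s₀ ++ [x]])).1, (splitA_ss ys y [y] ([] ++ [s₀ ++ [x]])).2]
      have := ih y []
      simp only [List.nil_append] at this ⊢
      rw [List.append_assoc]
      simp only [List.singleton_append]
      rw [this]
      conv_rhs => rw [runs]

lemma chunks_eq_runs (x : Int) (xs : List Int) :
    (splitA x xs [x] []).2 ++ [(splitA x xs [x] []).1] = runs (x :: xs) := by
  have := splitA_runs xs x []
  simp only [List.nil_append] at this
  rw [this]
  conv_rhs => rw [runs]

-- ---------- walkRun = walkKeys, mapped ----------

lemma walkRun_eq_map (d : PySem.Dict Int (Int × Int)) (vals : List Int) :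
    ∀ (fuel : Nat) (w : Int), walkRun d vals fuel w = (walkKeys vals fuel w).map (cardOf d) := by
  intro fuel
  induction fuel with
  | zero => intro w; simp [walkRun, walkKeys]
  | succ f ih =>
    intro w
    simp only [walkRun, walkKeys]
    split
    · simp [ih, cardOf]
    · simp

-- ---------- run decomposition basics ----------

lemma takeRun_dropRun (xs : List Int) : ∀ p, takeRun p xs ++ dropRun p xs = xs := by
  induction xs with
  | nil => intro p; simp [takeRun, dropRun]
  | cons y ys ih =>
    intro p
    by_cases h : y = p + 1
    · simp only [takeRun, dropRun, if_pos h, List.cons_append, ih y]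
    · simp [takeRun, dropRun, if_neg h]

lemma takeRun_pred (xs : List Int) : ∀ p, ∀ v ∈ takeRun p xs, v - 1 ∈ p :: takeRun p xs := by
  induction xs with
  | nil => intro p v hv; simp [takeRun] at hv
  | cons y ys ih =>
    intro p v hv
    by_cases h : y = p + 1
    · rw [takeRun, if_pos h] at hv ⊢
      rcases List.mem_cons.1 hv with rfl | hv'
      · simp [h]
      · rcases List.mem_cons.1 (ih y v hv') with h1 | h1
        · simp [h1]
        · simp [h1]
    · rw [takeRun, if_neg h] at hv
      simp at hv

lemma run_bound (xs : List Int) : ∀ (x y : Int), (x :: xs).Pairwise (· < ·) →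
    (dropRun x xs).head? = some y → ∀ w ∈ x :: takeRun x xs, w + 1 < y := by
  induction xs with
  | nil => intro x y _ hy; simp [dropRun] at hy
  | cons z zs ih =>
    intro x y hp hy w hw
    by_cases h : z = x + 1
    · rw [dropRun, if_pos h] at hy
      rw [takeRun, if_pos h] at hw
      have hp' : (z :: zs).Pairwise (· < ·) := hp.tail
      rcases List.mem_cons.1 hw with rfl | hw'
      · have := ih z y hp' hy z (by simp)
        omega
      · exact ih z y hp' hy w hw'
    · rw [dropRun, if_neg h] at hy
      rw [takeRun, if_neg h] at hw
      simp only [List.head?_cons, Option.some.injEq] at hy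
      subst hy
      simp only [List.mem_singleton] at hw
      subst hw
      have hxz : w < z := (List.pairwise_cons.1 hp).1 z (by simp)
      omega

-- ---------- B's walk from a run start reads off the first chunk ----------

lemma walk_eq_chunk (M : List Int) :
    ∀ (xs : List Int) (x : Int) (fuel : Nat), (x :: xs).Pairwise (· < ·) →
      (∀ a ∈ x :: xs, a ∈ M) →
      (∀ w ∈ x :: xs, w + 1 ∉ x :: xs → w + 1 ∉ M) →
      (x :: xs).length ≤ fuel →
      walkKeys M fuel x = x :: takeRun x xs := by
  intro xs
  induction xs with
  | nil =>
    intro x fuel _ hsub hstop hlen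
    cases fuel with
    | zero => simp at hlen
    | succ f =>
      rw [walkKeys, if_pos (show PySem.Set.contains M x = true from
        List.contains_iff_mem.2 (hsub x (by simp)))]
      have hnm : x + 1 ∉ M := hstop x (by simp) (by simp only [List.mem_singleton]; omega)
      cases f with
      | zero => simp [walkKeys, takeRun]
      | succ f' =>
        rw [walkKeys, if_neg (show ¬ PySem.Set.contains M (x + 1) = true from
          fun hc => hnm (List.contains_iff_mem.1 hc))]
        simp [takeRun]
  | cons y ys ih =>
    intro x fuel hp hsub hstop hlen
    cases fuel with
    | zero => simp at hlen
    | succ f =>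
      rw [walkKeys, if_pos (show PySem.Set.contains M x = true from
        List.contains_iff_mem.2 (hsub x (by simp)))]
      by_cases h : y = x + 1
      · subst h
        have htail : walkKeys M f (x + 1) = (x + 1) :: takeRun (x + 1) ys := by
          apply ih (x + 1) f hp.tail
          · intro a ha; exact hsub a (List.mem_cons_of_mem x ha)
          · intro w hw hw1
            apply hstop w (List.mem_cons_of_mem x hw)
            intro hmem
            rcases List.mem_cons.1 hmem with he | he
            · rcases List.mem_cons.1 hw with rfl | hw'
              · omega
              · have hlt := (List.pairwise_cons.1 hp).1 w (List.mem_cons_of_mem _ hw')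
                omega
            · exact hw1 he
          · simp only [List.length_cons] at hlen ⊢; omega
        rw [htail, takeRun, if_pos rfl]
      · have hx1 : x + 1 ∉ x :: y :: ys := by
          intro hmem
          rcases List.mem_cons.1 hmem with he | he
          · omega
          · rcases List.mem_cons.1 he with he' | he'
            · exact h he'.symm
            · have h1 := (List.pairwise_cons.1 hp).1 (x + 1) (List.mem_cons_of_mem _ he')
              have h2 := (List.pairwise_cons.1 hp.tail).1 (x + 1) he'
              have h3 := (List.pairwise_cons.1 hp).1 y (by simp)
              omega
        have hnm : x + 1 ∉ M := hstop x (by simp) hx1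
        cases f with
        | zero => simp at hlen
        | succ f' =>
          rw [walkKeys, if_neg (show ¬ PySem.Set.contains M (x + 1) = true from
            fun hc => hnm (List.contains_iff_mem.1 hc))]
          rw [takeRun, if_neg h]

-- ---------- B's filter + walk = runs ----------

lemma filter_walk_runs (M : List Int) (fuel : Nat) :
    ∀ (n : Nat) (S : List Int), S.length ≤ n → S.Pairwise (· < ·) → (∀ a ∈ S, a ∈ M) →
      (∀ w ∈ M, w ∈ S ∨ (∀ x, S.head? = some x → w + 1 < x)) → S.length ≤ fuel →
      (S.filter (fun v => !(PySem.Set.contains M (v - 1)))).map (walkKeys M fuel) = runs S := by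
  intro n
  induction n with
  | zero =>
    intro S hlen _ _ _ _
    have : S = [] := List.length_eq_zero_iff.1 (Nat.le_zero.1 hlen)
    subst this
    simp [runs]
  | succ m ih =>
    intro S hlen hp hsub hcov hfuel
    cases S with
    | nil => simp [runs]
    | cons x xs =>
      -- x is a run start
      have hxstart : x - 1 ∉ M := by
        intro hmem
        rcases hcov (x - 1) hmem with hin | hbound
        · rcases List.mem_cons.1 hin with he | he
          · omega
          · have := (List.pairwise_cons.1 hp).1 (x - 1) he
            omega
        · have := hbound x (by simp)
          omega
      -- elements of the first chunk are below the head of the rest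
      have hchunk_sub : ∀ w ∈ x :: takeRun x xs, w ∈ x :: xs := by
        intro w hw
        rcases List.mem_cons.1 hw with rfl | hw'
        · simp
        · apply List.mem_cons_of_mem
          rw [← takeRun_dropRun xs x]
          exact List.mem_append_left _ hw'
      have hstop : ∀ w ∈ x :: xs, w + 1 ∉ x :: xs → w + 1 ∉ M := by
        intro w hw hw1 hmem
        rcases hcov (w + 1) hmem with hin | hbound
        · exact hw1 hin
        · have h1 := hbound x (by simp)
          have h2 : x ≤ w := by
            rcases List.mem_cons.1 hw with rfl | hw'
            · omega
            · have := (List.pairwise_cons.1 hp).1 w hw'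
              omega
          omega
      have hwalk : walkKeys M fuel x = x :: takeRun x xs :=
        walk_eq_chunk M xs x fuel hp hsub hstop hfuel
      -- chunk-interior values are filtered out
      have hinterior : ∀ v ∈ takeRun x xs, (PySem.Set.contains M (v - 1)) = true := by
        intro v hv
        apply List.contains_iff_mem.2
        exact hsub _ (hchunk_sub _ (takeRun_pred xs x v hv))
      -- split the filter along S = x :: takeRun ++ dropRun
      have hsplit : (x :: xs).filter (fun v => !(PySem.Set.contains M (v - 1)))
          = x :: ((dropRun x xs).filter (fun v => !(PySem.Set.contains M (v - 1)))) := by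
        conv_lhs => rw [← takeRun_dropRun xs x]
        rw [List.filter_cons, List.filter_append]
        have h1 : (PySem.Set.contains M (x - 1)) = false := by
          cases hc : PySem.Set.contains M (x - 1)
          · rfl
          · exact absurd (List.contains_iff_mem.1 hc) hxstart
        have h2 : (takeRun x xs).filter (fun v => !(PySem.Set.contains M (v - 1))) = [] := by
          apply List.filter_eq_nil_iff.2
          intro v hv
          rw [hinterior v hv]
          simp
        rw [h2, h1]
        simp
      rw [hsplit, List.map_cons, hwalk]
      -- recurse on the rest
      have hrest_len : (dropRun x xs).length ≤ m := by
        have := dropRun_length_le x xs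
        simp at hlen
        omega
      have hS_eq : x :: xs = (x :: takeRun x xs) ++ dropRun x xs := by
        rw [List.cons_append, takeRun_dropRun]
      have hrest_pair : (dropRun x xs).Pairwise (· < ·) := by
        have : (dropRun x xs).Sublist (x :: xs) := by
          rw [hS_eq]; exact List.sublist_append_right _ _
        exact hp.sublist this
      have hrest_sub : ∀ a ∈ dropRun x xs, a ∈ M := by
        intro a ha
        apply hsub
        rw [hS_eq]; exact List.mem_append_right _ ha
      have hrest_cov : ∀ w ∈ M, w ∈ dropRun x xs ∨ (∀ y, (dropRun x xs).head? = some y → w + 1 < y) := by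
        intro w hw
        rcases hcov w hw with hin | hbound
        · rw [hS_eq] at hin
          rcases List.mem_append.1 hin with hc | hr
          · right
            intro y hy
            exact run_bound xs x y hp hy w hc
          · left; exact hr
        · right
          intro y hy
          have h1 := hbound x (by simp)
          have h2 : x + 1 < y ∨ x = y ∨ y ∈ dropRun x xs := by
            right; right
            exact List.mem_of_mem_head? hy
          have hy_mem : y ∈ x :: xs := by
            rw [hS_eq]
            exact List.mem_append_right _ (List.mem_of_mem_head? hy)
          rcases List.mem_cons.1 hy_mem with rfl | hy'
          · omega
          · have := (List.pairwise_cons.1 hp).1 y hy'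
            omega
      have hrest_fuel : (dropRun x xs).length ≤ fuel := by
        have := dropRun_length_le x xs
        simp at hfuel
        omega
      rw [ih (dropRun x xs) hrest_len hrest_pair hrest_sub hrest_cov hrest_fuel]
      conv_rhs => rw [runs]

-- ---------- pick folds transfer through map ----------

lemma foldl_pick_map (g : Int → Int × Int) :
    ∀ (rs : List (List Int)) (b : List Int),
      (rs.map (List.map g)).foldl
        (fun (bb r : List (Int × Int)) => if bb.length ≤ r.length then r else bb) (b.map g)
      = (rs.foldl pick b).map g := by
  intro rs
  induction rs with
  | nil => intro b; rfl
  | cons r rest ih =>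
    intro b
    simp only [List.map_cons, List.foldl_cons, List.length_map, pick]
    split
    · exact ih r
    · exact ih b

lemma bfold_map (d : PySem.Dict Int (Int × Int)) (vals : List Int) (fuel : Nat) :
    ∀ (K : List Int) (b : List Int),
      K.foldl (fun best v =>
          if PySem.Set.contains vals (v - 1) then best
          else
            let run := walkRun d vals fuel v
            if best.length ≤ run.length then run else best) (b.map (cardOf d))
      = (K.foldl (fun best v =>
          if PySem.Set.contains vals (v - 1) then best else pick best (walkKeys vals fuel v)) b).map (cardOf d) := by
  intro K
  induction K with
  | nil => intro b; rfl
  | cons v vs ih =>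
    intro b
    simp only [List.foldl_cons]
    split
    · exact ih b
    · simp only [walkRun_eq_map d vals fuel v, List.length_map, pick]
      split
      · exact ih _
      · exact ih b

lemma bFoldK_eq_filter (M : List Int) (fuel : Nat) (K : List Int) :
    bFoldK M fuel K
      = ((K.filter (fun v => !(PySem.Set.contains M (v - 1)))).map (walkKeys M fuel)).foldl pick [] := by
  unfold bFoldK
  rw [List.foldl_map]
  have : ∀ (b : List Int) (l : List Int),
      l.foldl (fun best v => if PySem.Set.contains M (v - 1) then best else pick best (walkKeys M fuel v)) b
      = (l.filter (fun v => !(PySem.Set.contains M (v - 1)))).foldl (fun b v => pick b (walkKeys M fuel v)) b := by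
    intro b l
    induction l generalizing b with
    | nil => rfl
    | cons v vs ih =>
      simp only [List.foldl_cons, List.filter_cons]
      cases h : PySem.Set.contains M (v - 1) with
      | true => simp only [Bool.not_true]; exact ih b
      | false => simp only [Bool.not_false, Bool.false_eq_true, if_false, if_true]; exact ih _
  exact this [] K

lemma foldl_pick_nil_cons (r : List Int) (rest : List (List Int)) :
    (r :: rest).foldl pick [] = rest.foldl pick r := by
  simp [pick]

lemma set_update_ne_nil (l : List Int) : ∀ s : List Int, s ≠ [] → PySem.Set.update s l ≠ [] := by
  induction l with
  | nil => intro s hs; simpa [PySem.Set.update] using hs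
  | cons a as ih =>
    intro s hs
    have h1 : PySem.Set.update s (a :: as) = PySem.Set.update (PySem.Set.add s a) as := by
      simp [PySem.Set.update]
    rw [h1]
    apply ih
    unfold PySem.Set.add
    split
    · exact hs
    · simp

lemma set_update_cons_nil (a : Int) (as : List Int) :
    PySem.Set.update ([] : List Int) (a :: as) = PySem.Set.update [a] as := by
  simp [PySem.Set.update, PySem.Set.add]

lemma cardDict_keys_ne_nil (cards : List Int) (h : cards ≠ []) : (cardDict cards).keys ≠ [] := by
  obtain ⟨c, cs, rfl⟩ := List.exists_cons_of_ne_nil h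
  unfold cardDict
  rw [PySem.Dict.keys_foldl_insert_key, List.map_cons, PySem.Dict.keys_empty,
    set_update_cons_nil]
  exact set_update_ne_nil _ _ (by simp)

lemma withAce_keys_ne_nil (d : PySem.Dict Int (Int × Int)) (h : d.keys ≠ []) :
    (withAce d).keys ≠ [] := by
  unfold withAce
  split
  · exact List.ne_nil_of_mem ((PySem.Dict.mem_keys_insert _ _ _ _).2 (Or.inl rfl))
  · exact h

-- ===== VERDICT (by name: the statement is the Claim_ definition above) =====
theorem find_max_sequence_spec : Claim_equal_find_max_sequence := by
  intro cards _ hpre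
  unfold Spec_find_max_sequence
  simp only [find_max_sequence, find_max_sequence_alt]
  by_cases hs : (cardDict cards).size = 1
  · simp [hs]
  · simp only [if_neg hs]
    have hnd : (withAce (cardDict cards)).keys.Nodup :=
      withAce_nodup_keys _ (cardDict_nodup_keys cards)
    have hinv : ∀ p ∈ (withAce (cardDict cards)).items, p.2.1 = p.1 :=
      withAce_items_fst _ (cardDict_items_fst cards)
    have hkeysne : (withAce (cardDict cards)).keys ≠ [] :=
      withAce_keys_ne_nil _ (cardDict_keys_ne_nil cards hpre)
    set d2 := withAce (cardDict cards) with hd2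
    set g := cardOf d2 with hg
    set K := PySem.List.sorted d2.keys (fun v => v) false with hKdef
    have hKne : K ≠ [] := by
      rw [hKdef, Ne, PySem.List.sorted_eq_nil_iff]; exact hkeysne
    obtain ⟨k0, Kt, hKeq⟩ := List.exists_cons_of_ne_nil hKne
    have hKlt : K.Pairwise (· < ·) := K_pairwise_lt d2 hnd
    have hmemK : ∀ a ∈ K, (g a).1 = a := fun a ha =>
      cardOf_fst d2 hnd hinv a ((PySem.List.mem_sorted _ _ _ _).1 ha)
    -- common key-level best sequence
    have hofl : PySem.Set.ofList d2.keys = d2.keys := PySem.Set.ofList_eq_self_of_nodup _ hnd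
    -- ===== A side =====
    have hcs : PySem.List.sorted2 d2.values Prod.fst Prod.snd = K.map g :=
      sorted_values_eq d2 hnd hinv
    rw [hcs, hKeq]
    have hA := zipfold_map g Kt k0 [k0] [] (by rw [← hKeq]; exact hmemK)
    simp only [List.map_cons, List.map_nil] at hA
    simp only [List.map_cons, List.tail_cons, List.headD_cons]
    rw [hA]
    have hseq : (splitA k0 Kt [k0] []).2.map (List.map g) ++ [(splitA k0 Kt [k0] []).1.map g]
        = (runs (k0 :: Kt)).map (List.map g) := by
      rw [← chunks_eq_runs k0 Kt]
      simp
    rw [hseq]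
    have hruns : runs (k0 :: Kt) = (k0 :: takeRun k0 Kt) :: runs (dropRun k0 Kt) := by
      conv_lhs => rw [runs]
    rw [hruns, List.map_cons]
    rw [lastLongest_eq_foldl (fun s => s.length) _ _ []]
    rw [foldl_pick_map g (runs (dropRun k0 Kt)) (k0 :: takeRun k0 Kt)]
    -- ===== B side =====
    rw [hofl, ← hKdef, hKeq]
    have hB := bfold_map d2 d2.keys d2.keys.length (k0 :: Kt) []
    simp only [List.map_nil] at hB
    rw [hB]
    have hfw : ((k0 :: Kt).filter (fun v => !(PySem.Set.contains d2.keys (v - 1)))).map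
          (walkKeys d2.keys d2.keys.length) = runs (k0 :: Kt) := by
      apply filter_walk_runs d2.keys d2.keys.length (k0 :: Kt).length (k0 :: Kt) le_rfl
      · rw [← hKeq]; exact hKlt
      · intro a ha
        rw [← hKeq] at ha
        exact (PySem.List.mem_sorted _ _ _ _).1 ha
      · intro w hw
        left
        rw [← hKeq]
        exact (PySem.List.mem_sorted _ _ _ _).2 hw
      · rw [← hKeq, hKdef, PySem.List.length_sorted]
    have hbk : bFoldK d2.keys d2.keys.length (k0 :: Kt)
        = (runs (dropRun k0 Kt)).foldl pick (k0 :: takeRun k0 Kt) := by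
      rw [bFoldK_eq_filter, hfw, hruns, foldl_pick_nil_cons]
    unfold bFoldK at hbk
    rw [hbk]
    generalize PySem.List.slice
        (List.map g ((runs (dropRun k0 Kt)).foldl pick (k0 :: takeRun k0 Kt))) (some (-5)) none = L
    cases L with
    | nil => rfl
    | cons p ps => simp
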